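-- pv_equiv track=rewrite | github.com/nihal-ranchod/weather-rag-ibm-hackathon | enhanced_ai_response.py | _determine_climate_zone
-- ===== SOURCE A (Python) =====
-- from typing import Dict, List, Optional
--
-- def _determine_climate_zone(location_name: str, historical_data: Dict) -> str:
--     """Determine climate zone based on location and data"""
--
--     location_lower = location_name.lower()
--     stats = historical_data.get('statistics', {})
--     avg_temp = stats.get('avg_temperature', 20)
--
--     if any(term in location_lower for term in ['arctic', 'alaska', 'greenland']):
--         return "Arctic Climate"
--     elif any(term in location_lower for term in ['canada', 'russia', 'scandinavia']) and avg_temp < 10: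
--         return "Subarctic Climate"
--     elif any(term in location_lower for term in ['tropical', 'equator', 'amazon', 'congo']):
--         return "Tropical Climate"
--     elif any(term in location_lower for term in ['desert', 'sahara', 'arizona', 'nevada']):
--         return "Arid Climate"
--     elif any(term in location_lower for term in ['mediterranean', 'california', 'chile']):
--         return "Mediterranean Climate"
--     elif avg_temp > 25:
--         return "Subtropical Climate"
--     elif avg_temp < 10:
--         return "Continental Climate"
--     else:
--         return "Temperate Climate"
-- ===== SOURCE B (Python) =====
-- _KEYWORD_PRIORITY = [
--     ('arctic', 0), ('alaska', 0), ('greenland', 0),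
--     ('canada', 1), ('russia', 1), ('scandinavia', 1),
--     ('tropical', 2), ('equator', 2), ('amazon', 2), ('congo', 2),
--     ('desert', 3), ('sahara', 3), ('arizona', 3), ('nevada', 3),
--     ('mediterranean', 4), ('california', 4), ('chile', 4),
-- ]
--
-- _PRIORITY_ZONE = [
--     "Arctic Climate", "Subarctic Climate", "Tropical Climate",
--     "Arid Climate", "Mediterranean Climate",
-- ]
--
--
-- def _determine_climate_zone(location_name: str, historical_data: dict) -> str:
--     """Determine climate zone: collect every matching keyword's priority and
--     take the best (minimum); fall back to a temperature-only zone."""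
--     loc = location_name.lower()
--     avg_temp = historical_data.get('statistics', {}).get('avg_temperature', 20)
--     hits = [p for kw, p in _KEYWORD_PRIORITY
--             if kw in loc and (p != 1 or avg_temp < 10)]
--     if hits:
--         return _PRIORITY_ZONE[min(hits)]
--     if avg_temp > 25:
--         return "Subtropical Climate"
--     if avg_temp < 10:
--         return "Continental Climate"
--     return "Temperate Climate"
-- ===== Notes on version B (the rewrite author's own statement) =====
-- stated objective: alternative
-- what changed: Replaces A's first-match if/elif cascade by a collect-and-aggregate pass over a flat keyword-to-priority table: B gathers the priorities of all matching keywords, returns the zone of the minimum priority, and falls back to a temperature-only zone when no keyword matches.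
import Mathlib
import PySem

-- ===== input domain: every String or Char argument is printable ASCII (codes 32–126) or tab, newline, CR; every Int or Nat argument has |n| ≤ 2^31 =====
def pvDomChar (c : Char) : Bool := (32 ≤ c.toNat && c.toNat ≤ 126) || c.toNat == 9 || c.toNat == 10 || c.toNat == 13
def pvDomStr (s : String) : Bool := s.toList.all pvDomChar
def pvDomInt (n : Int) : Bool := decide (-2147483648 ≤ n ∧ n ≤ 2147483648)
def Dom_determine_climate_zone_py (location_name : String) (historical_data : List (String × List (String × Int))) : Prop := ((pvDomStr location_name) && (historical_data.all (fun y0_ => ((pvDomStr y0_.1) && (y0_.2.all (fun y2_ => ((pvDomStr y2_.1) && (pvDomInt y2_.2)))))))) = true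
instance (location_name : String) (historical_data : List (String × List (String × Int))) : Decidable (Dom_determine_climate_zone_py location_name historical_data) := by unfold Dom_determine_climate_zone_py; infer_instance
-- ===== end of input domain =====

-- B replaces A's first-match elif cascade by collect-and-aggregate over a flat keyword→priority
-- table: it gathers the priorities of ALL matching keywords, takes the minimum, and falls back to
-- a temperature-only zone; same behaviour and cost ('alternative').

-- ===== PORT A =====
-- any(term in location_lower for term in terms)
def pyAnyTermIn (terms : List String) (s : String) : Bool :=
  terms.any (fun t => PySem.Str.isIn t s)

def determine_climate_zone_py (location_name : String) (historical_data : List (String × List (String × Int))) : String :=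
  let location_lower := PySem.Str.lower location_name
  let stats := (PySem.Dict.mk historical_data).getD "statistics" []
  let avg_temp := (PySem.Dict.mk stats).getD "avg_temperature" 20
  if pyAnyTermIn ["arctic", "alaska", "greenland"] location_lower then "Arctic Climate"
  else if pyAnyTermIn ["canada", "russia", "scandinavia"] location_lower && decide (avg_temp < 10) then "Subarctic Climate"
  else if pyAnyTermIn ["tropical", "equator", "amazon", "congo"] location_lower then "Tropical Climate"
  else if pyAnyTermIn ["desert", "sahara", "arizona", "nevada"] location_lower then "Arid Climate"
  else if pyAnyTermIn ["mediterranean", "california", "chile"] location_lower then "Mediterranean Climate"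
  else if decide (avg_temp > 25) then "Subtropical Climate"
  else if decide (avg_temp < 10) then "Continental Climate"
  else "Temperate Climate"

-- ===== PORT B =====
-- the module-level _KEYWORD_PRIORITY table
def czKeywords : List (String × Int) :=
  [("arctic", 0), ("alaska", 0), ("greenland", 0),
   ("canada", 1), ("russia", 1), ("scandinavia", 1),
   ("tropical", 2), ("equator", 2), ("amazon", 2), ("congo", 2),
   ("desert", 3), ("sahara", 3), ("arizona", 3), ("nevada", 3),
   ("mediterranean", 4), ("california", 4), ("chile", 4)]

-- the module-level _PRIORITY_ZONE table
def czZones : List String :=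
  ["Arctic Climate", "Subarctic Climate", "Tropical Climate",
   "Arid Climate", "Mediterranean Climate"]

-- the comprehension's condition: kw in loc and (p != 1 or avg_temp < 10)
def czPred (loc : String) (avg_temp : Int) (kp : String × Int) : Bool :=
  PySem.Str.isIn kp.1 loc && (kp.2 != 1 || decide (avg_temp < 10))

def determine_climate_zone_py_alt (location_name : String) (historical_data : List (String × List (String × Int))) : String :=
  let loc := PySem.Str.lower location_name
  let avg_temp := (PySem.Dict.mk ((PySem.Dict.mk historical_data).getD "statistics" [])).getD "avg_temperature" 20
  let hits := (czKeywords.filter (czPred loc avg_temp)).map (fun kp => kp.2)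
  -- 'if hits: return _PRIORITY_ZONE[min(hits)]' — min? is none exactly on the empty list;
  -- the .getD is a totality guard only: min(hits) is a priority 0..4, inside czZones' range
  match PySem.List.min? hits (fun y => y) with
  | some m => (PySem.List.pyGet? czZones m).getD ""
  | none =>
    if decide (avg_temp > 25) then "Subtropical Climate"
    else if decide (avg_temp < 10) then "Continental Climate"
    else "Temperate Climate"

-- ===== PRECONDITION & SPEC =====
def Spec_determine_climate_zone_py (location_name : String) (historical_data : List (String × List (String × Int))) (out : String) : Prop := out = determine_climate_zone_py_alt location_name historical_data
instance (location_name : String) (historical_data : List (String × List (String × Int))) (out : String) : Decidable (Spec_determine_climate_zone_py location_name historical_data out) := by unfold Spec_determine_climate_zone_py; infer_instance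

-- ===== CLAIM =====
def Claim_equal_determine_climate_zone_py : Prop := ∀ (location_name : String) (historical_data : List (String × List (String × Int))), Dom_determine_climate_zone_py location_name historical_data → Spec_determine_climate_zone_py location_name historical_data (determine_climate_zone_py location_name historical_data)

-- ===== LEMMAS AND PROOFS =====

-- folding min over elements all ≥ the accumulator leaves the accumulator
theorem cz_foldl_min_ge (a : Int) (l : List Int) (h : ∀ x ∈ l, a ≤ x) : l.foldl min a = a := by
  induction l with
  | nil => rfl
  | cons x t ih =>
    rw [List.foldl_cons, min_eq_left (h x (by simp))]
    exact ih (fun y hy => h y (by simp [hy]))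

-- min? of a block of p's followed by elements ≥ p
theorem cz_min?_append_const (p : Int) (l r : List Int)
    (hl : ∀ x ∈ l, x = p) (hr : ∀ x ∈ r, p ≤ x) :
    PySem.List.min? (l ++ r) (fun y => y) =
      if l.isEmpty then PySem.List.min? r (fun y => y) else some p := by
  cases l with
  | nil => simp
  | cons x t =>
    have hx : x = p := hl x (by simp)
    rw [List.cons_append, PySem.List.min?_id_cons]
    have : (t ++ r).foldl min x = x := by
      apply cz_foldl_min_ge
      intro y hy
      rcases List.mem_append.mp hy with h | h
      · exact le_of_eq (hx ▸ (hl y (by simp [h])).symm)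
      · exact hx ▸ hr y h
    rw [this, hx]
    simp

-- second components of a filtered group are the group's priority
theorem cz_snd_filter (q : String × Int → Bool) (g : List (String × Int)) (p : Int)
    (hg : ∀ kp ∈ g, kp.2 = p) :
    ∀ x ∈ (g.filter q).map (fun kp => kp.2), x = p := by
  intro x hx
  simp only [List.mem_map] at hx
  obtain ⟨kp, hkp, rfl⟩ := hx
  exact hg kp (List.mem_filter.mp hkp).1

-- min? of the empty/nonempty all-p list
theorem cz_min?_const (p : Int) (l : List Int) (hl : ∀ x ∈ l, x = p) :
    PySem.List.min? l (fun y => y) = if l.isEmpty then none else some p := by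
  have h := cz_min?_append_const p l [] hl (by simp)
  rw [List.append_nil] at h
  rw [h]
  cases l <;> simp

-- each group's filtered block is empty exactly when no keyword of the group occurs
theorem cz_empty0 (loc : String) (v : Int) :
    ((([("arctic", (0:Int)), ("alaska", 0), ("greenland", 0)]).filter (czPred loc v)).map (fun kp => kp.2)).isEmpty
      = !(PySem.Str.isIn "arctic" loc || (PySem.Str.isIn "alaska" loc || PySem.Str.isIn "greenland" loc)) := by
  cases h1 : PySem.Str.isIn "arctic" loc <;> cases h2 : PySem.Str.isIn "alaska" loc <;>
    cases h3 : PySem.Str.isIn "greenland" loc <;>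
    (simp only [czPred, List.filter_cons, List.filter_nil, h1, h2, h3]; try rfl)

theorem cz_empty1 (loc : String) (v : Int) :
    ((([("canada", (1:Int)), ("russia", 1), ("scandinavia", 1)]).filter (czPred loc v)).map (fun kp => kp.2)).isEmpty
      = !((PySem.Str.isIn "canada" loc || (PySem.Str.isIn "russia" loc || PySem.Str.isIn "scandinavia" loc)) && decide (v < 10)) := by
  cases h1 : PySem.Str.isIn "canada" loc <;> cases h2 : PySem.Str.isIn "russia" loc <;>
    cases h3 : PySem.Str.isIn "scandinavia" loc <;> cases hv : decide (v < 10) <;>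
    (simp only [czPred, List.filter_cons, List.filter_nil, h1, h2, h3, hv]; try rfl)

theorem cz_empty2 (loc : String) (v : Int) :
    ((([("tropical", (2:Int)), ("equator", 2), ("amazon", 2), ("congo", 2)]).filter (czPred loc v)).map (fun kp => kp.2)).isEmpty
      = !(PySem.Str.isIn "tropical" loc || (PySem.Str.isIn "equator" loc || (PySem.Str.isIn "amazon" loc || PySem.Str.isIn "congo" loc))) := by
  cases h1 : PySem.Str.isIn "tropical" loc <;> cases h2 : PySem.Str.isIn "equator" loc <;>
    cases h3 : PySem.Str.isIn "amazon" loc <;> cases h4 : PySem.Str.isIn "congo" loc <;>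
    (simp only [czPred, List.filter_cons, List.filter_nil, h1, h2, h3, h4]; try rfl)

theorem cz_empty3 (loc : String) (v : Int) :
    ((([("desert", (3:Int)), ("sahara", 3), ("arizona", 3), ("nevada", 3)]).filter (czPred loc v)).map (fun kp => kp.2)).isEmpty
      = !(PySem.Str.isIn "desert" loc || (PySem.Str.isIn "sahara" loc || (PySem.Str.isIn "arizona" loc || PySem.Str.isIn "nevada" loc))) := by
  cases h1 : PySem.Str.isIn "desert" loc <;> cases h2 : PySem.Str.isIn "sahara" loc <;>
    cases h3 : PySem.Str.isIn "arizona" loc <;> cases h4 : PySem.Str.isIn "nevada" loc <;>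
    (simp only [czPred, List.filter_cons, List.filter_nil, h1, h2, h3, h4]; try rfl)

theorem cz_empty4 (loc : String) (v : Int) :
    ((([("mediterranean", (4:Int)), ("california", 4), ("chile", 4)]).filter (czPred loc v)).map (fun kp => kp.2)).isEmpty
      = !(PySem.Str.isIn "mediterranean" loc || (PySem.Str.isIn "california" loc || PySem.Str.isIn "chile" loc)) := by
  cases h1 : PySem.Str.isIn "mediterranean" loc <;> cases h2 : PySem.Str.isIn "california" loc <;>
    cases h3 : PySem.Str.isIn "chile" loc <;>
    (simp only [czPred, List.filter_cons, List.filter_nil, h1, h2, h3]; try rfl)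

-- B's collect-and-min over the keyword table, characterised as a priority decision
theorem cz_hits_min (loc : String) (v : Int) :
    PySem.List.min? ((czKeywords.filter (czPred loc v)).map (fun kp => kp.2)) (fun y => y) =
      (if PySem.Str.isIn "arctic" loc || (PySem.Str.isIn "alaska" loc || PySem.Str.isIn "greenland" loc) then some 0
       else if (PySem.Str.isIn "canada" loc || (PySem.Str.isIn "russia" loc || PySem.Str.isIn "scandinavia" loc)) && decide (v < 10) then some 1
       else if PySem.Str.isIn "tropical" loc || (PySem.Str.isIn "equator" loc || (PySem.Str.isIn "amazon" loc || PySem.Str.isIn "congo" loc)) then some 2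
       else if PySem.Str.isIn "desert" loc || (PySem.Str.isIn "sahara" loc || (PySem.Str.isIn "arizona" loc || PySem.Str.isIn "nevada" loc)) then some 3
       else if PySem.Str.isIn "mediterranean" loc || (PySem.Str.isIn "california" loc || PySem.Str.isIn "chile" loc) then some 4
       else none) := by
  have e : czKeywords =
      [("arctic", (0:Int)), ("alaska", 0), ("greenland", 0)] ++
      ([("canada", 1), ("russia", 1), ("scandinavia", 1)] ++
       ([("tropical", 2), ("equator", 2), ("amazon", 2), ("congo", 2)] ++
        ([("desert", 3), ("sahara", 3), ("arizona", 3), ("nevada", 3)] ++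
         [("mediterranean", 4), ("california", 4), ("chile", 4)]))) := rfl
  rw [e]
  simp only [List.filter_append, List.map_append]
  have m0 := cz_snd_filter (czPred loc v) [("arctic", (0:Int)), ("alaska", 0), ("greenland", 0)] 0 (by decide)
  have m1 := cz_snd_filter (czPred loc v) [("canada", (1:Int)), ("russia", 1), ("scandinavia", 1)] 1 (by decide)
  have m2 := cz_snd_filter (czPred loc v) [("tropical", (2:Int)), ("equator", 2), ("amazon", 2), ("congo", 2)] 2 (by decide)
  have m3 := cz_snd_filter (czPred loc v) [("desert", (3:Int)), ("sahara", 3), ("arizona", 3), ("nevada", 3)] 3 (by decide)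
  have m4 := cz_snd_filter (czPred loc v) [("mediterranean", (4:Int)), ("california", 4), ("chile", 4)] 4 (by decide)
  rw [cz_min?_append_const 0 _ _ m0 (by
    intro x hx; simp only [List.mem_append] at hx
    rcases hx with h | h | h | h
    · have := m1 x h; omega
    · have := m2 x h; omega
    · have := m3 x h; omega
    · have := m4 x h; omega)]
  rw [cz_min?_append_const 1 _ _ m1 (by
    intro x hx; simp only [List.mem_append] at hx
    rcases hx with h | h | h
    · have := m2 x h; omega
    · have := m3 x h; omega
    · have := m4 x h; omega)]
  rw [cz_min?_append_const 2 _ _ m2 (by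
    intro x hx; simp only [List.mem_append] at hx
    rcases hx with h | h
    · have := m3 x h; omega
    · have := m4 x h; omega)]
  rw [cz_min?_append_const 3 _ _ m3 (fun x h => by have := m4 x h; omega)]
  rw [cz_min?_const 4 _ m4]
  rw [cz_empty0, cz_empty1, cz_empty2, cz_empty3, cz_empty4]
  cases b0 : PySem.Str.isIn "arctic" loc || (PySem.Str.isIn "alaska" loc || PySem.Str.isIn "greenland" loc) <;>
  cases b1 : PySem.Str.isIn "canada" loc || (PySem.Str.isIn "russia" loc || PySem.Str.isIn "scandinavia" loc) <;>
  cases b2 : PySem.Str.isIn "tropical" loc || (PySem.Str.isIn "equator" loc || (PySem.Str.isIn "amazon" loc || PySem.Str.isIn "congo" loc)) <;>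
  cases b3 : PySem.Str.isIn "desert" loc || (PySem.Str.isIn "sahara" loc || (PySem.Str.isIn "arizona" loc || PySem.Str.isIn "nevada" loc)) <;>
  cases b4 : PySem.Str.isIn "mediterranean" loc || (PySem.Str.isIn "california" loc || PySem.Str.isIn "chile" loc) <;>
  cases hv : decide (v < 10) <;>
  simp

-- ===== VERDICT =====
theorem determine_climate_zone_py_spec : Claim_equal_determine_climate_zone_py := by
  intro location_name historical_data _
  unfold Spec_determine_climate_zone_py determine_climate_zone_py determine_climate_zone_py_alt
  simp only [pyAnyTermIn, List.any_cons, List.any_nil, Bool.or_false]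
  rw [cz_hits_min]
  generalize (PySem.Dict.mk ((PySem.Dict.mk historical_data).getD "statistics" [])).getD "avg_temperature" 20 = v
  generalize PySem.Str.lower location_name = l
  cases b0 : PySem.Str.isIn "arctic" l || (PySem.Str.isIn "alaska" l || PySem.Str.isIn "greenland" l) <;>
  cases b1 : PySem.Str.isIn "canada" l || (PySem.Str.isIn "russia" l || PySem.Str.isIn "scandinavia" l) <;>
  cases b2 : PySem.Str.isIn "tropical" l || (PySem.Str.isIn "equator" l || (PySem.Str.isIn "amazon" l || PySem.Str.isIn "congo" l)) <;>
  cases b3 : PySem.Str.isIn "desert" l || (PySem.Str.isIn "sahara" l || (PySem.Str.isIn "arizona" l || PySem.Str.isIn "nevada" l)) <;>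
  cases b4 : PySem.Str.isIn "mediterranean" l || (PySem.Str.isIn "california" l || PySem.Str.isIn "chile" l) <;>
  cases t10 : decide (v < 10) <;>
  cases t25 : decide (v > 25) <;>
  rfl
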